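-- pv_equiv track=rewrite | github.com/KwonTaeyong/Python_v7 | learning26.py | solution
-- ===== SOURCE A (Python) =====
-- from collections import Counter
--
-- def solution(weights):
--     # 시소에서 사용할 각 거리의 배수
--     distances = [2, 3, 4]
--
--     # 각 무게에 대해 가중치 * 거리 계산
--     torque_values = []
--     for weight in weights:
--         for distance in distances:
--             torque_values.append(weight * distance)
--
--     # torque_values 리스트에서 같은 값을 세는 Counter 객체 생성
--     counter = Counter(torque_values)
--
--     # 짝꿍 쌍을 계산하기 위해 각 값에 대해 가능한 쌍의 수를 구합니다.
--     answer = 0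
--     for count in counter.values():
--         if count > 1:
--             # n개의 같은 값이 있으면 그 중 2개를 뽑는 경우의 수는 nC2 = n * (n - 1) // 2
--             answer += count * (count - 1) // 2
--
--     return answer
-- ===== SOURCE B (Python) =====
-- def solution(weights):
--     # One pass: for each torque value, add the number of equal values seen so far.
--     seen = {}
--     answer = 0
--     for w in weights:
--         for m in (2, 3, 4):
--             t = w * m
--             c = seen.get(t, 0)
--             answer += c
--             seen[t] = c + 1
--     return answer
-- ===== Notes on version B (the rewrite author's own statement) =====
-- stated objective: alternative
-- what changed: Instead of materialising the torque list, building a Counter and summing nC2 over its counts in a second pass, B counts pairs online in a single pass: each new torque value adds the number of equal values already seen.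
import Mathlib
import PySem

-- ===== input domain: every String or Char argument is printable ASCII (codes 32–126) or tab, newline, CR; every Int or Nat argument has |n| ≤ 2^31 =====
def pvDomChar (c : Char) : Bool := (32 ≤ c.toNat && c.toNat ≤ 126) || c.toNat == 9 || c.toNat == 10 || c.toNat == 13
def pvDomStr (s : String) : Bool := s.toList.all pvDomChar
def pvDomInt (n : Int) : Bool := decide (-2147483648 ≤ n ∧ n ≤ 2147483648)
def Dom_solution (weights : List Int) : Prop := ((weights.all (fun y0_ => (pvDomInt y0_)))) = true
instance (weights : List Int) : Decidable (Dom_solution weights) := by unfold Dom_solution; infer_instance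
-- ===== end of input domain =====

-- B replaces A's "build torque list, Counter, sum nC2 over counts in a second pass" by a
-- one-pass online pair count (each torque adds the number of equal torques seen so far).

-- ===== PORT A =====
def solution (weights : List Int) : Int :=
  let distances : List Int := [2, 3, 4]
  let torque_values : List Int :=
    weights.foldl (fun acc weight =>
      distances.foldl (fun acc2 distance => acc2 ++ [weight * distance]) acc) []
  let counter : PySem.Dict Int Int := PySem.Dict.counter torque_values
  counter.values.foldl (fun answer count =>
    if 1 < count then answer + PySem.Int.floordiv (count * (count - 1)) 2 else answer) 0

-- ===== PORT B =====
-- one step of B's inner loop: seen[t] bumped, answer += previously seen count of t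
def bStep (st : PySem.Dict Int Int × Int) (t : Int) : PySem.Dict Int Int × Int :=
  let c := st.1.getD t 0
  (st.1.insert t (c + 1), st.2 + c)

def solution_alt (weights : List Int) : Int :=
  (weights.foldl (fun st w =>
    ([2, 3, 4] : List Int).foldl (fun st2 m => bStep st2 (w * m)) st)
    (PySem.Dict.empty, 0)).2

-- ===== PRECONDITION & SPEC =====
def Spec_solution (weights : List Int) (out : Int) : Prop := out = solution_alt weights
instance (weights : List Int) (out : Int) : Decidable (Spec_solution weights out) := by unfold Spec_solution; infer_instance

-- ===== CLAIM (what is proved, stated in full; the proofs are below) =====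
def Claim_equal_solution : Prop := ∀ (weights : List Int), Dom_solution weights → Spec_solution weights (solution weights)

-- ===== LEMMAS AND PROOFS =====

-- the summand of A's final loop (= nC2 of a count, with A's count > 1 guard)
def pairF (c : Int) : Int := if 1 < c then PySem.Int.floordiv (c * (c - 1)) 2 else 0

-- A's answer as a sum over the distinct values of the torque list
def pairsSum (xs : List Int) : Int :=
  ((PySem.Set.ofList xs).map (fun k => pairF ((xs.count k : Int)))).sum

lemma pairF_step (n : Nat) : pairF ((n : Int) + 1) = pairF (n : Int) + n := by
  match n with
  | 0 => decide
  | 1 => decide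
  | (m+2) =>
    unfold pairF
    have h1 : ((m+2 : Nat) : Int) + 1 = ((m+3 : Nat) : Int) := by push_cast; ring
    rw [h1]
    rw [if_pos (by push_cast; omega : (1:Int) < ((m+3 : Nat) : Int)),
        if_pos (by push_cast; omega : (1:Int) < ((m+2 : Nat) : Int))]
    rw [show ((m+3 : Nat) : Int) * (((m+3 : Nat) : Int) - 1) = (((m+3)*(m+2) : Nat) : Int) by push_cast; ring,
        show ((m+2 : Nat) : Int) * (((m+2 : Nat) : Int) - 1) = (((m+2)*(m+1) : Nat) : Int) by push_cast; ring]
    rw [show PySem.Int.floordiv ((((m+3)*(m+2) : Nat)) : Int) 2 = (((m+3)*(m+2)/2 : Nat) : Int) from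
          by exact_mod_cast PySem.Int.floordiv_natCast ((m+3)*(m+2)) 2,
        show PySem.Int.floordiv ((((m+2)*(m+1) : Nat)) : Int) 2 = (((m+2)*(m+1)/2 : Nat) : Int) from
          by exact_mod_cast PySem.Int.floordiv_natCast ((m+2)*(m+1)) 2]
    have goalN : (m+3)*(m+2)/2 = (m+2)*(m+1)/2 + (m+2) := by
      have hd : 2 ∣ (m+2)*(m+1) := by
        rcases Nat.even_or_odd m with ⟨k, hk⟩ | ⟨k, hk⟩ <;> subst hk
        · exact ⟨(k+1)*(k+k+1), by ring⟩
        · exact ⟨(k+k+3)*(k+1), by ring⟩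
      have hh : (m+3)*(m+2) = (m+2)*(m+1) + 2*(m+2) := by ring
      omega
    exact_mod_cast congrArg (fun k : Nat => (k : Int)) goalN

lemma sum_map_update {S : List Int} (hnd : S.Nodup) {x : Int} (hx : x ∈ S)
    (g g' : Int → Int) (δ : Int) (hxval : g' x = g x + δ)
    (hother : ∀ k ∈ S, k ≠ x → g' k = g k) :
    (S.map g').sum = (S.map g).sum + δ := by
  induction S with
  | nil => cases hx
  | cons a S ih =>
    rcases List.nodup_cons.mp hnd with ⟨ha, hndS⟩
    rcases List.mem_cons.mp hx with h | h
    · subst h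
      have : S.map g' = S.map g := List.map_congr_left (fun k hk => hother k (List.mem_cons_of_mem _ hk) (fun e => ha (e ▸ hk)))
      simp [this, hxval]; ring
    · have hax : a ≠ x := fun e => ha (e ▸ h)
      have := ih hndS h (fun k hk hkx => hother k (List.mem_cons_of_mem _ hk) hkx)
      simp [this, hother a (List.mem_cons_self) hax]; ring

lemma pairsSum_append (xs : List Int) (x : Int) :
    pairsSum (xs ++ [x]) = pairsSum xs + (xs.count x : Int) := by
  unfold pairsSum
  have hset : PySem.Set.ofList (xs ++ [x]) = PySem.Set.add (PySem.Set.ofList xs) x := by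
    simp [PySem.Set.ofList_eq_foldl, List.foldl_append]
  rw [hset]
  by_cases hx : x ∈ xs
  · have hmem : x ∈ PySem.Set.ofList xs := (PySem.Set.mem_ofList xs x).mpr hx
    rw [PySem.Set.add_of_mem hmem]
    apply sum_map_update (PySem.Set.nodup_ofList xs) hmem
    · simp only [List.count_append, List.count_singleton, beq_self_eq_true, if_true]
      push_cast
      exact pairF_step (xs.count x)
    · intro k hk hkx
      have hb : (x == k) = false := beq_eq_false_iff_ne.mpr (fun e => hkx e.symm)
      simp only [List.count_append, List.count_singleton, hb, Bool.false_eq_true, if_false, Nat.add_zero]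
  · have hmem : x ∉ PySem.Set.ofList xs := fun h => hx ((PySem.Set.mem_ofList xs x).mp h)
    rw [PySem.Set.add_of_not_mem hmem, List.map_append, List.sum_append]
    have h0 : (xs.count x : Int) = 0 := by
      simp [List.count_eq_zero_of_not_mem hx]
    rw [h0]
    have hmap : (PySem.Set.ofList xs).map (fun k => pairF (((xs ++ [x]).count k : Int)))
        = (PySem.Set.ofList xs).map (fun k => pairF ((xs.count k : Int))) := by
      apply List.map_congr_left
      intro k hk
      have hkx : k ≠ x := fun e => hmem (e ▸ hk)
      have hb : (x == k) = false := beq_eq_false_iff_ne.mpr (fun e => hkx e.symm)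
      simp only [List.count_append, List.count_singleton, hb, Bool.false_eq_true, if_false, Nat.add_zero]
    rw [hmap]
    simp [pairF, hx]

lemma bfold_eq (xs : List Int) :
    xs.foldl bStep (PySem.Dict.empty, 0) = (PySem.Dict.counter xs, pairsSum xs) := by
  induction xs using List.reverseRecOn with
  | nil => decide
  | append_singleton xs x ih =>
    rw [List.foldl_append, ih]
    have hc : PySem.Dict.counter (xs ++ [x])
        = (PySem.Dict.counter xs).insert x ((PySem.Dict.counter xs).getD x 0 + 1) := by
      rw [← PySem.Dict.foldl_insert_getD_add_one_eq_counter,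
          ← PySem.Dict.foldl_insert_getD_add_one_eq_counter, List.foldl_append]
      rfl
    rw [hc, pairsSum_append]
    simp only [List.foldl_cons, List.foldl_nil, bStep, PySem.Dict.getD_counter]

lemma A_eq_pairsSum (xs : List Int) :
    (PySem.Dict.counter xs).values.foldl (fun answer count =>
      if 1 < count then answer + PySem.Int.floordiv (count * (count - 1)) 2 else answer) 0
    = pairsSum xs := by
  have h1 : (PySem.Dict.counter xs).values.foldl (fun answer count =>
      if 1 < count then answer + PySem.Int.floordiv (count * (count - 1)) 2 else answer) 0
      = (PySem.Dict.counter xs).values.foldl (fun answer count => answer + pairF count) 0 :=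
    by apply PySem.List.foldl_congr_mem; intro acc c _; unfold pairF; split <;> simp
  rw [h1, PySem.List.foldl_add]
  unfold pairsSum
  simp [PySem.Dict.values, PySem.Dict.items_counter]
  rfl

-- ===== VERDICT (by name: the statement is the Claim_ definition above) =====
theorem solution_spec : Claim_equal_solution := by
  intro weights _
  unfold Spec_solution
  dsimp only [solution, solution_alt]
  have htorque : weights.foldl (fun acc weight =>
      ([2,3,4] : List Int).foldl (fun acc2 distance => acc2 ++ [weight * distance]) acc) []
      = weights.flatMap (fun w => [w*2, w*3, w*4]) := by
    calc weights.foldl (fun acc weight =>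
          ([2,3,4] : List Int).foldl (fun acc2 distance => acc2 ++ [weight * distance]) acc) []
        = weights.foldl (fun acc weight => acc ++ [weight*2, weight*3, weight*4]) [] := by
          apply PySem.List.foldl_congr_mem
          intro acc w _
          rw [PySem.List.foldl_append_singleton_eq_map]
          rfl
      _ = weights.flatMap (fun w => [w*2, w*3, w*4]) := by
          rw [PySem.List.foldl_append_eq_flatMap]
          rfl
  have halt : weights.foldl (fun st w =>
      ([2, 3, 4] : List Int).foldl (fun st2 m => bStep st2 (w * m)) st) (PySem.Dict.empty, 0)
      = (weights.flatMap (fun w => [w*2, w*3, w*4])).foldl bStep (PySem.Dict.empty, 0) := by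
    rw [List.foldl_flatMap]
    apply PySem.List.foldl_congr_mem
    intro st w _
    rfl
  rw [htorque, halt, bfold_eq, A_eq_pairsSum]
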